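-- pv_equiv track=rewrite | github.com/RaymanPython/Yandex_lizwy | QT 3. Обработка исключений. Создание собственных исключений/Пароли. Часть 1.py | F
-- ===== SOURCE A (Python) =====
-- def F(a):
--     bad_sequence = ['qwertyuiop', 'asdfghjkl',
--                     'zxcvbnm', 'йцукенгшщзхъ', 'фывапролджэё', 'ячсмитьбю']
--     num = list('1234567890')
--     if len(a) <= 8:
--         return 'error'
--     if a.islower() or a.isupper():
--         return 'error'
--     if a.isdigit() or a.isalpha():
--         return 'error'
--     b = a.lower()
--     for i in bad_sequence:
--         for j in range(len(i) - 2):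
--             if i[j: j + 3] in b:
--                 return 'error'
--     for i in num:
--         if i in a:
--             return 'ok'
--     return 'error'
-- ===== SOURCE B (Python) =====
-- def F(a):
--     bad_sequence = ['qwertyuiop', 'asdfghjkl',
--                     'zxcvbnm', 'йцукенгшщзхъ', 'фывапролджэё', 'ячсмитьбю']
--     trigrams = set()
--     for seq in bad_sequence:
--         for j in range(len(seq) - 2):
--             trigrams.add(seq[j:j + 3])
--     digits = set('1234567890')
--     if len(a) <= 8:
--         return 'error'
--     if a.islower() or a.isupper():
--         return 'error'
--     if a.isdigit() or a.isalpha():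
--         return 'error'
--     b = a.lower()
--     for i in range(len(b) - 2):
--         if b[i:i + 3] in trigrams:
--             return 'error'
--     if any(ch in digits for ch in a):
--         return 'ok'
--     return 'error'
-- ===== Notes on version B (the rewrite author's own statement) =====
-- stated objective: alternative
-- what changed: B precomputes the set of all length-3 substrings of the forbidden keyboard sequences once and then slides a single 3-character window over the lowercased password (and checks digits by one pass over the password against a digit set), instead of A's substring search over the password for every position of every forbidden sequence.
import Mathlib
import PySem

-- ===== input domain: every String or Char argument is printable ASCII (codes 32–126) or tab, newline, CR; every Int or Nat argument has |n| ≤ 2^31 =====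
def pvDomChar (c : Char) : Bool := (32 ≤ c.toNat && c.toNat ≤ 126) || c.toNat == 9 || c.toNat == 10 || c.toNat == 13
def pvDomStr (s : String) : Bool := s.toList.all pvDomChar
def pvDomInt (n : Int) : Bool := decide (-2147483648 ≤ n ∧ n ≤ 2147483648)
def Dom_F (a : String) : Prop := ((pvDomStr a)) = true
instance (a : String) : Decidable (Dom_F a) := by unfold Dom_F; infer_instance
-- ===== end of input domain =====

-- B replaces A's per-forbidden-pattern substring scans with one sliding-window pass over the
-- password against a precomputed set of forbidden trigrams (objective: alternative decomposition).

-- shared data, and str.islower()/str.isupper() helpers (exact on the ASCII domain,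
-- where the cased characters are exactly the letters)
def badSeq : List String :=
  ["qwertyuiop", "asdfghjkl", "zxcvbnm", "йцукенгшщзхъ", "фывапролджэё", "ячсмитьбю"]

def pyStrIslower (cs : List Char) : Bool :=
  cs.any PySem.Chars.islower && !(cs.any PySem.Chars.isupper)

def pyStrIsupper (cs : List Char) : Bool :=
  cs.any PySem.Chars.isupper && !(cs.any PySem.Chars.islower)

-- ===== PORT A =====
def numList : List String := ["1", "2", "3", "4", "5", "6", "7", "8", "9", "0"]

def F (a : String) : String :=
  let al := a.toList
  if al.length ≤ 8 then "error"
  else if pyStrIslower al || pyStrIsupper al then "error"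
  else if PySem.Chars.strIsdigit al || PySem.Chars.strIsalpha al then "error"
  else
    let b := PySem.Chars.lower al
    if badSeq.any (fun i =>
        (PySem.List.pyRange 0 ((i.toList.length : Int) - 2)).any (fun j =>
          PySem.Chars.isIn (PySem.List.slice i.toList (some j) (some (j + 3))) b))
    then "error"
    else if numList.any (fun i => PySem.Chars.isIn i.toList al) then "ok"
    else "error"

-- ===== PORT B =====
def trigramSet : PySem.Set (List Char) :=
  badSeq.foldl (fun s seq =>
    (PySem.List.pyRange 0 ((seq.toList.length : Int) - 2)).foldl
      (fun s j => s.add (PySem.List.slice seq.toList (some j) (some (j + 3)))) s)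
    PySem.Set.empty

def digitSet : PySem.Set Char := PySem.Set.ofList "1234567890".toList

def F_alt (a : String) : String :=
  let al := a.toList
  if al.length ≤ 8 then "error"
  else if pyStrIslower al || pyStrIsupper al then "error"
  else if PySem.Chars.strIsdigit al || PySem.Chars.strIsalpha al then "error"
  else
    let b := PySem.Chars.lower al
    if (PySem.List.pyRange 0 ((b.length : Int) - 2)).any (fun i =>
        trigramSet.contains (PySem.List.slice b (some i) (some (i + 3))))
    then "error"
    else if al.any (fun ch => digitSet.contains ch) then "ok"
    else "error"

-- ===== PRECONDITION & SPEC =====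
def Spec_F (a : String) (out : String) : Prop := out = F_alt a
instance (a : String) (out : String) : Decidable (Spec_F a out) := by unfold Spec_F; infer_instance

-- ===== CLAIM (what is proved, stated in full; the proofs are below) =====
def Claim_equal_F : Prop := ∀ (a : String), Dom_F a → Spec_F a (F a)

-- ===== LEMMAS AND PROOFS =====

-- a slice xs[j:j+3] inside bounds has length 3
lemma slice3_len {α : Type} (xs : List α) (j : Int) (h0 : 0 ≤ j)
    (h : j < (xs.length : Int) - 2) :
    (PySem.List.slice xs (some j) (some (j + 3))).length = 3 := by
  obtain ⟨n, rfl⟩ := Int.eq_ofNat_of_zero_le h0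
  rw [show ((n : Int) + 3) = ((n + 3 : Nat) : Int) by push_cast; ring,
    PySem.List.slice_natCast]
  simp
  omega

-- a length-3 pattern occurs in b iff it equals one of b's length-3 windows
lemma window_iff (t b : List Char) (ht : t.length = 3) :
    PySem.Chars.isIn t b = true ↔
      ∃ i : Int, 0 ≤ i ∧ i < (b.length : Int) - 2 ∧
        PySem.List.slice b (some i) (some (i + 3)) = t := by
  constructor
  · intro h
    rcases (PySem.Chars.isIn_iff_infix t b).mp h with ⟨u, v, rfl⟩
    refine ⟨u.length, by positivity, by simp [ht]; omega, ?_⟩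
    rw [show ((u.length : Int) + 3) = ((u.length + 3 : Nat) : Int) by push_cast; ring,
      PySem.List.slice_natCast]
    have h1 : (u ++ t ++ v).drop u.length = t ++ v := by
      rw [List.append_assoc]; exact List.drop_left
    rw [show u.length + 3 - u.length = 3 by omega, h1, ← ht, List.take_left]
  · rintro ⟨i, h0, hlt, rfl⟩
    obtain ⟨n, rfl⟩ := Int.eq_ofNat_of_zero_le h0
    rw [show ((n : Int) + 3) = ((n + 3 : Nat) : Int) by push_cast; ring,
      PySem.List.slice_natCast]
    apply (PySem.Chars.exists_prefix_drop_iff_isIn _ _).mp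
    exact ⟨n, by simpa using List.take_prefix _ _⟩

-- membership in the foldl-built trigram set
lemma mem_trig_foldl (seqs : List String) (s0 : PySem.Set (List Char)) (y : List Char) :
    y ∈ seqs.foldl (fun s seq =>
        (PySem.List.pyRange 0 ((seq.toList.length : Int) - 2)).foldl
          (fun s j => s.add (PySem.List.slice seq.toList (some j) (some (j + 3)))) s) s0 ↔
      y ∈ s0 ∨ ∃ seq ∈ seqs, ∃ j ∈ PySem.List.pyRange 0 ((seq.toList.length : Int) - 2),
        y = PySem.List.slice seq.toList (some j) (some (j + 3)) := by
  induction seqs generalizing s0 with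
  | nil => simp
  | cons s rest ih =>
    rw [List.foldl_cons, ih, PySem.Set.mem_foldl_add]
    simp only [List.mem_cons]
    constructor
    · rintro ((h | ⟨j, hj, hy⟩) | ⟨sq, hsq, hj⟩)
      · exact Or.inl h
      · exact Or.inr ⟨s, Or.inl rfl, j, hj, hy⟩
      · exact Or.inr ⟨sq, Or.inr hsq, hj⟩
    · rintro (h | ⟨sq, rfl | hsq, hj⟩)
      · exact Or.inl (Or.inl h)
      · exact Or.inl (Or.inr hj)
      · exact Or.inr ⟨sq, hsq, hj⟩

lemma mem_trigramSet (y : List Char) :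
    y ∈ trigramSet ↔
      ∃ seq ∈ badSeq, ∃ j : Int, 0 ≤ j ∧ j < (seq.toList.length : Int) - 2 ∧
        y = PySem.List.slice seq.toList (some j) (some (j + 3)) := by
  unfold trigramSet
  rw [mem_trig_foldl]
  simp [PySem.Set.empty_eq, PySem.List.mem_pyRange_one, and_assoc]

-- A's nested scan and B's sliding-window scan agree
lemma scan_eq (b : List Char) :
    (badSeq.any (fun i =>
        (PySem.List.pyRange 0 ((i.toList.length : Int) - 2)).any (fun j =>
          PySem.Chars.isIn (PySem.List.slice i.toList (some j) (some (j + 3))) b)))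
      = ((PySem.List.pyRange 0 ((b.length : Int) - 2)).any (fun i =>
          trigramSet.contains (PySem.List.slice b (some i) (some (i + 3))))) := by
  rw [Bool.eq_iff_iff]
  simp only [List.any_eq_true, PySem.List.mem_pyRange_one, PySem.Set.contains_iff,
    mem_trigramSet]
  constructor
  · rintro ⟨sq, hsq, j, ⟨hj0, hjlt⟩, hin⟩
    rcases (window_iff _ b (slice3_len _ _ hj0 hjlt)).mp hin with ⟨i, hi0, hilt, heq⟩
    exact ⟨i, ⟨hi0, hilt⟩, sq, hsq, j, hj0, hjlt, heq⟩
  · rintro ⟨i, ⟨hi0, hilt⟩, sq, hsq, j, hj0, hjlt, heq⟩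
    refine ⟨sq, hsq, j, ⟨hj0, hjlt⟩, ?_⟩
    exact (window_iff _ b (slice3_len _ _ hj0 hjlt)).mpr ⟨i, hi0, hilt, heq⟩

-- A's per-digit substring loop and B's per-character set-membership pass agree
lemma digit_eq (al : List Char) :
    (numList.any (fun i => PySem.Chars.isIn i.toList al))
      = (al.any (fun ch => digitSet.contains ch)) := by
  rw [Bool.eq_iff_iff]
  have hsing : ∀ (c : Char), PySem.Chars.isIn [c] al = true ↔ c ∈ al := fun c => by
    rw [PySem.Chars.isIn_iff_infix]; exact List.singleton_infix_iff c al
  simp only [numList, digitSet, List.any_cons, List.any_nil, Bool.or_eq_true,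
    Bool.or_false, List.any_eq_true, PySem.Set.contains_iff, PySem.Set.mem_ofList,
    show "1".toList = ['1'] from rfl, show "2".toList = ['2'] from rfl,
    show "3".toList = ['3'] from rfl, show "4".toList = ['4'] from rfl,
    show "5".toList = ['5'] from rfl, show "6".toList = ['6'] from rfl,
    show "7".toList = ['7'] from rfl, show "8".toList = ['8'] from rfl,
    show "9".toList = ['9'] from rfl, show "0".toList = ['0'] from rfl,
    show "1234567890".toList = ['1','2','3','4','5','6','7','8','9','0'] from rfl,
    hsing, List.mem_cons, List.not_mem_nil, or_false]
  constructor
  · rintro (h | h | h | h | h | h | h | h | h | h) <;>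
      exact ⟨_, h, by simp⟩
  · rintro ⟨c, hc, hd⟩
    rcases hd with rfl|rfl|rfl|rfl|rfl|rfl|rfl|rfl|rfl|rfl <;> simp [hc]

-- ===== VERDICT (by name: the statement is the Claim_ definition above) =====
theorem F_spec : Claim_equal_F := by
  intro a _
  show F a = F_alt a
  simp only [F, F_alt, scan_eq, digit_eq]
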